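-- pv_equiv track=rewrite | github.com/wangyuheng/cinder | cinder_cli/extended_proxy_decision.py | _select_high_structure
-- ===== SOURCE A (Python) =====
-- from typing import Any
--
-- def _select_high_structure(options: list[dict[str, Any]]) -> dict[str, Any]:
--     """Select option with highest structure/complexity."""
--     if not options:
--         return {}
--
--     scored_options = []
--     for option in options:
--         complexity = option.get("complexity", "medium")
--         score = {"low": 1, "medium": 2, "high": 3}.get(complexity, 2)
--         scored_options.append((option, score))
--
--     scored_options.sort(key=lambda x: x[1], reverse=True)
--     return scored_options[0][0]
-- ===== SOURCE B (Python) =====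
-- def _score(option):
--     complexity = option.get("complexity", "medium")
--     return {"low": 1, "medium": 2, "high": 3}.get(complexity, 2)
--
--
-- def _select_high_structure(options):
--     if not options:
--         return {}
--     for target in (3, 2, 1):
--         for option in options:
--             if _score(option) == target:
--                 return option
-- ===== Notes on version B (the rewrite author's own statement) =====
-- stated objective: alternative
-- what changed: Replaces building a scored list and stable reverse-sorting it with a descending-priority search: for each target score 3,2,1 scan the options in order and return the first option whose score matches, which yields the same first-wins maximum without any sort.
import Mathlib
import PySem

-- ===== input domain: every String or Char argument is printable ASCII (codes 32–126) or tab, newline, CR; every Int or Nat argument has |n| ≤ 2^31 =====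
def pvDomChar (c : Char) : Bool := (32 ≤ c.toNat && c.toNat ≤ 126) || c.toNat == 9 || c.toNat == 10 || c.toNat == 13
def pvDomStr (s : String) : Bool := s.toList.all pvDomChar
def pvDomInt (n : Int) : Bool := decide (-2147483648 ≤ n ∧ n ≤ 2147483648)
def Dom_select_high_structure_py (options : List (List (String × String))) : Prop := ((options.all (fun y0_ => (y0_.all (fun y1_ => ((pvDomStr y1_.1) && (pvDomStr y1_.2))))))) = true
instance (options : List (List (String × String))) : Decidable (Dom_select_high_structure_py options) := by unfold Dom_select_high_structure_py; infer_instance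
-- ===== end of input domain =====

-- B replaces score-list-building plus stable reverse sort by a descending-priority linear search (alternative decomposition, same result).

-- ===== PORT A =====
-- A, transliterated: build the scored list with a left fold of appends, stable reverse-sort by the
-- score component, take the first element's option.  option.get("complexity","medium") is the
-- first-match association-list lookup; the literal rank dict is a PySem.Dict.
def select_high_structure_py (options : List (List (String × String))) : List (String × String) :=
  if options = [] then []
  else
    let scored_options := options.foldl (fun acc option =>
      let complexity := ((option.find? (fun p => p.1 == "complexity")).map Prod.snd).getD "medium"
      let score := PySem.Dict.getD (PySem.Dict.ofList [("low", (1 : Int)), ("medium", 2), ("high", 3)]) complexity 2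
      acc ++ [(option, score)]) []
    match PySem.List.sorted scored_options (fun x => x.2) true with
    | [] => []          -- unreachable: options ≠ []
    | x :: _ => x.1

-- ===== PORT B =====
-- B's helper _score(option)
def pvScoreB (option : List (String × String)) : Int :=
  let complexity := ((option.find? (fun p => p.1 == "complexity")).map Prod.snd).getD "medium"
  PySem.Dict.getD (PySem.Dict.ofList [("low", (1 : Int)), ("medium", 2), ("high", 3)]) complexity 2

-- B: for target in (3, 2, 1): return the first option scoring target
def select_high_structure_py_alt (options : List (List (String × String))) : List (String × String) :=
  if options = [] then []
  else
    match [(3 : Int), 2, 1].findSome? (fun target => options.find? (fun option => pvScoreB option == target)) with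
    | some option => option
    | none => []        -- unreachable: every score is 1, 2 or 3

-- ===== PRECONDITION & SPEC =====
def Spec_select_high_structure_py (options : List (List (String × String))) (out : List (String × String)) : Prop := out = select_high_structure_py_alt options
instance (options : List (List (String × String))) (out : List (String × String)) : Decidable (Spec_select_high_structure_py options out) := by unfold Spec_select_high_structure_py; infer_instance

-- ===== CLAIM (what is proved, stated in full; the proofs are below) =====
def Claim_equal_select_high_structure_py : Prop := ∀ (options : List (List (String × String))), Dom_select_high_structure_py options → Spec_select_high_structure_py options (select_high_structure_py options)

-- ===== LEMMAS AND PROOFS =====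

-- proof-side: the first element attaining the maximal key (first-wins on ties)
def pvFmax {α : Type} (key : α → Int) : α → List α → α
  | b, [] => b
  | b, y :: ys => if key b < key y then pvFmax key y ys else pvFmax key b ys

theorem pvFmax_append {α : Type} (key : α → Int) (l : List α) (b x : α) :
    pvFmax key b (l ++ [x]) = if key (pvFmax key b l) < key x then x else pvFmax key b l := by
  induction l generalizing b with
  | nil => simp [pvFmax]
  | cons y ys ih =>
      simp only [List.cons_append, pvFmax]
      by_cases h : key b < key y <;> simp [h, ih]

theorem pvFmax_eq_or_lt {α : Type} (key : α → Int) (l : List α) (b : α) :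
    pvFmax key b l = b ∨ key b < key (pvFmax key b l) := by
  induction l generalizing b with
  | nil => left; rfl
  | cons y ys ih =>
      simp only [pvFmax]
      by_cases h : key b < key y
      · simp only [h, if_pos]
        rcases ih y with h' | h'
        · right; rw [h']; exact h
        · right; exact lt_trans h h'
      · simp only [h, if_neg, not_false_iff]
        exact ih b

-- head of the stable reverse sort is the first maximum
theorem head_sorted_rev_eq_pvFmax {α : Type} (key : α → Int) (l : List α) (b : α) :
    ∃ t, PySem.List.sorted (b :: l) key true = pvFmax key b l :: t := by
  induction l using List.reverseRecOn with
  | nil =>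
      refine ⟨[], ?_⟩
      rw [PySem.List.sorted_rev_eq_foldl_insertBy]
      simp [PySem.List.insertBy, pvFmax]
  | append_singleton l x ih =>
      obtain ⟨t, ht⟩ := ih
      have hsplit : PySem.List.sorted (b :: (l ++ [x])) key true
          = PySem.List.insertBy (fun a c => decide (key c < key a)) x (PySem.List.sorted (b :: l) key true) := by
        rw [show b :: (l ++ [x]) = (b :: l) ++ [x] from rfl,
            PySem.List.sorted_rev_eq_foldl_insertBy, List.foldl_append,
            ← PySem.List.sorted_rev_eq_foldl_insertBy]
        rfl
      rw [hsplit, ht, pvFmax_append]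
      by_cases h : key (pvFmax key b l) < key x
      · refine ⟨pvFmax key b l :: t, ?_⟩
        simp [PySem.List.insertBy, h]
      · refine ⟨PySem.List.insertBy (fun a c => decide (key c < key a)) x t, ?_⟩
        simp [PySem.List.insertBy, h]

-- everything in the list is bounded by the first maximum
theorem le_pvFmax {α : Type} (key : α → Int) (l : List α) (b : α) :
    ∀ y ∈ b :: l, key y ≤ key (pvFmax key b l) := by
  obtain ⟨t, ht⟩ := head_sorted_rev_eq_pvFmax key l b
  exact PySem.List.key_head_sorted_rev_ge (b :: l) key ht

-- the first element whose key equals the first maximum's key IS the first maximum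
theorem find_pvFmax {α : Type} (key : α → Int) (l : List α) (b : α) :
    (b :: l).find? (fun o => key o == key (pvFmax key b l)) = some (pvFmax key b l) := by
  induction l generalizing b with
  | nil => simp [pvFmax]
  | cons y ys ih =>
      by_cases h : key b < key y
      · have hm : pvFmax key b (y :: ys) = pvFmax key y ys := by simp [pvFmax, h]
        rw [hm]
        have hy : key y ≤ key (pvFmax key y ys) := le_pvFmax key ys y y (by simp)
        rw [List.find?_cons_of_neg (by simp only [beq_iff_eq]; omega)]
        exact ih y
      · have hm : pvFmax key b (y :: ys) = pvFmax key b ys := by simp [pvFmax, h]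
        rw [hm]
        rcases pvFmax_eq_or_lt key ys b with he | hlt
        · rw [he, List.find?_cons_of_pos (by simp)]
        · have hb : ¬ ((fun o => key o == key (pvFmax key b ys)) b = true) := by
            simp only [beq_iff_eq]; omega
          rw [List.find?_cons_of_neg (p := fun o => key o == key (pvFmax key b ys)) hb]
          have hys := ih b
          rw [List.find?_cons_of_neg (p := fun o => key o == key (pvFmax key b ys)) hb] at hys
          rw [List.find?_cons_of_neg (p := fun o => key o == key (pvFmax key b ys))
            (by simp only [beq_iff_eq]; omega)]
          exact hys

-- the first maximum commutes with tagging each option by its score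
theorem pvFmax_map_score (l : List (List (String × String))) (b : List (String × String)) :
    pvFmax (fun x : (List (String × String)) × Int => x.2) (b, pvScoreB b) (l.map (fun o => (o, pvScoreB o)))
      = (pvFmax pvScoreB b l, pvScoreB (pvFmax pvScoreB b l)) := by
  induction l generalizing b with
  | nil => rfl
  | cons y ys ih =>
      simp only [List.map_cons, pvFmax]
      by_cases h : pvScoreB b < pvScoreB y <;> simp [h, ih]

-- every score is 1, 2 or 3
theorem pvScoreB_cases (o : List (String × String)) :
    pvScoreB o = 1 ∨ pvScoreB o = 2 ∨ pvScoreB o = 3 := by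
  unfold pvScoreB
  rw [show PySem.Dict.ofList [("low", (1 : Int)), ("medium", 2), ("high", 3)]
      = PySem.Dict.mk [("low", (1 : Int)), ("medium", 2), ("high", 3)] from by decide]
  simp only [PySem.Dict.getD, PySem.Dict.get?_mk_cons]
  split_ifs <;> simp [PySem.Dict.get?]

-- B computes the first maximum on a nonempty list
theorem alt_eq_pvFmax (l : List (List (String × String))) (b : List (String × String)) :
    select_high_structure_py_alt (b :: l) = pvFmax pvScoreB b l := by
  unfold select_high_structure_py_alt
  rw [if_neg (by simp)]
  have hle := le_pvFmax pvScoreB l b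
  have hfind := find_pvFmax pvScoreB l b
  rcases pvScoreB_cases (pvFmax pvScoreB b l) with hM | hM | hM
  · have h3 : (b :: l).find? (fun o => pvScoreB o == (3 : Int)) = none := by
      rw [List.find?_eq_none]
      intro y hy
      have := hle y hy
      simp only [beq_iff_eq]
      omega
    have h2 : (b :: l).find? (fun o => pvScoreB o == (2 : Int)) = none := by
      rw [List.find?_eq_none]
      intro y hy
      have := hle y hy
      simp only [beq_iff_eq]
      omega
    rw [hM] at hfind
    simp [List.findSome?, h3, h2, hfind]
  · have h3 : (b :: l).find? (fun o => pvScoreB o == (3 : Int)) = none := by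
      rw [List.find?_eq_none]
      intro y hy
      have := hle y hy
      simp only [beq_iff_eq]
      omega
    rw [hM] at hfind
    simp [List.findSome?, h3, hfind]
  · rw [hM] at hfind
    simp [List.findSome?, hfind]

-- A computes the first maximum on a nonempty list
theorem a_eq_pvFmax (l : List (List (String × String))) (b : List (String × String)) :
    select_high_structure_py (b :: l) = pvFmax pvScoreB b l := by
  unfold select_high_structure_py
  rw [if_neg (by simp)]
  show (match PySem.List.sorted ((b :: l).foldl
      (fun acc option => acc ++ [(option, pvScoreB option)]) []) (fun x => x.2) true with
    | [] => []
    | x :: _ => x.1) = pvFmax pvScoreB b l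
  rw [PySem.List.foldl_append_singleton_eq_map]
  have hmap : (b :: l).map (fun o => (o, pvScoreB o))
      = (b, pvScoreB b) :: l.map (fun o => (o, pvScoreB o)) := by simp
  rw [List.nil_append, hmap]
  obtain ⟨t, ht⟩ := head_sorted_rev_eq_pvFmax (fun x : (List (String × String)) × Int => x.2)
      (l.map (fun o => (o, pvScoreB o))) (b, pvScoreB b)
  rw [ht, pvFmax_map_score]

-- ===== VERDICT (by name: the statement is the Claim_ definition above) =====
theorem select_high_structure_py_spec : Claim_equal_select_high_structure_py := by
  intro options _
  unfold Spec_select_high_structure_py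
  cases options with
  | nil => rfl
  | cons b l => rw [a_eq_pvFmax, alt_eq_pvFmax]
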